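-- pv_equiv track=rewrite | github.com/dlsdud9098/git_programmers | level0/120862.py | solution
-- ===== SOURCE A (Python) =====
-- def solution(numbers):
--     answer = []
--     for i in range(len(numbers)):
--         for j in range(len(numbers)):
--             if len(numbers) == 2:
--                 return numbers[i]*numbers[i+1]
--             else:
--                 if i != j:
--                     answer.append(numbers[i]*numbers[j])
--     return max(answer)
-- ===== SOURCE B (Python) =====
-- def solution(numbers):
--     s = sorted(numbers)
--     return max(s[0] * s[1], s[-2] * s[-1])
-- ===== Notes on version B (the rewrite author's own statement) =====
-- stated objective: faster
-- what changed: A enumerates all n^2 index pairs and takes the max of the product list; B sorts once and compares only the product of the two smallest with the product of the two largest elements.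
import Mathlib
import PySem

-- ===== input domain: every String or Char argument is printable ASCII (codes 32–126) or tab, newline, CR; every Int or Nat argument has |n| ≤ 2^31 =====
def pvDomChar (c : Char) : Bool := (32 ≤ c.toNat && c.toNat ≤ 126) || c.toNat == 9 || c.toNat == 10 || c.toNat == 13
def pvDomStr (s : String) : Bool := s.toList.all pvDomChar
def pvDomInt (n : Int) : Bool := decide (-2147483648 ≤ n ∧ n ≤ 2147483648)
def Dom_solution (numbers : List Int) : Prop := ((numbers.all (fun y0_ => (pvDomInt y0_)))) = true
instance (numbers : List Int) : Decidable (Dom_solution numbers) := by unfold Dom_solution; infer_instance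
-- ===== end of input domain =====

-- B replaces A's O(n^2) enumeration of all index-pair products by one sort and a comparison
-- of the two-smallest and two-largest products (faster).

-- ===== PORT A =====
-- inner 'for j in range(len(numbers))' loop; '.error v' models the early 'return v'
def solAInner (numbers : List Int) (i : Int) (js : List Int) (answer : List Int) :
    Except Int (List Int) :=
  match js with
  | [] => .ok answer
  | j :: rest =>
    if numbers.length == 2 then
      .error (PySem.List.pyGetD numbers i 0 * PySem.List.pyGetD numbers (i + 1) 0)
    else if i ≠ j then
      solAInner numbers i rest
        (answer ++ [PySem.List.pyGetD numbers i 0 * PySem.List.pyGetD numbers j 0])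
    else
      solAInner numbers i rest answer

-- outer 'for i in range(len(numbers))' loop
def solAOuter (numbers : List Int) (is : List Int) (answer : List Int) :
    Except Int (List Int) :=
  match is with
  | [] => .ok answer
  | i :: rest =>
    match solAInner numbers i (PySem.List.pyRange 0 numbers.length 1) answer with
    | .error v => .error v
    | .ok ans => solAOuter numbers rest ans

def solution (numbers : List Int) : Int :=
  match solAOuter numbers (PySem.List.pyRange 0 numbers.length 1) [] with
  | .error v => v
  | .ok answer => (PySem.List.max? answer (fun x => x)).getD 0  -- max([]) raises: excluded by Pre_

-- ===== PORT B =====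
def solution_alt (numbers : List Int) : Int :=
  let s := PySem.List.sorted numbers (fun x => x) false
  max (PySem.List.pyGetD s 0 0 * PySem.List.pyGetD s 1 0)
      (PySem.List.pyGetD s (-2) 0 * PySem.List.pyGetD s (-1) 0)

-- ===== PRECONDITION & SPEC =====
-- A raises on lists of length < 2 (max of an empty list: ValueError); excluded.
def Pre_solution (numbers : List Int) : Prop := 2 ≤ numbers.length
instance (numbers : List Int) : Decidable (Pre_solution numbers) := by
  unfold Pre_solution; infer_instance

def pvWitness_solution : List Int := [3, -1, 4]

def Spec_solution (numbers : List Int) (out : Int) : Prop := out = solution_alt numbers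
instance (numbers : List Int) (out : Int) : Decidable (Spec_solution numbers out) := by
  unfold Spec_solution; infer_instance

-- ===== CLAIM (what is proved, stated in full; the proofs are below) =====
def Claim_equal_solution : Prop :=
  ∀ (numbers : List Int), Dom_solution numbers → Pre_solution numbers →
    Spec_solution numbers (solution numbers)

-- ===== LEMMAS AND PROOFS =====

-- 'x is a product of two distinct-position elements of l', stated permutation-invariantly
def IsPair (l : List Int) (x : Int) : Prop :=
  ∃ a b t, l.Perm (a :: b :: t) ∧ x = a * b

theorem isPair_of_perm {l l' : List Int} {x : Int} (h : l.Perm l') :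
    IsPair l' x → IsPair l x := by
  rintro ⟨a, b, t, hp, hx⟩
  exact ⟨a, b, t, h.trans hp, hx⟩

theorem idx_to_pair (l : List Int) (i j : Nat) (hi : i < l.length) (hj : j < l.length)
    (hne : i ≠ j) : IsPair l (l[i] * l[j]) := by
  induction l generalizing i j with
  | nil => simp at hi
  | cons a t ih =>
    match i, j with
    | 0, 0 => exact absurd rfl hne
    | 0, k + 1 =>
      have hk : k < t.length := by simpa using hj
      refine ⟨a, t[k], t.erase t[k], ?_, by simp⟩
      exact List.Perm.cons a (List.perm_cons_erase (t.getElem_mem hk))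
    | k + 1, 0 =>
      have hk : k < t.length := by simpa using hi
      refine ⟨t[k], a, t.erase t[k], ?_, by simp⟩
      exact (List.Perm.cons a (List.perm_cons_erase (t.getElem_mem hk))).trans
        (List.Perm.swap _ _ _)
    | k + 1, m + 1 =>
      have hk : k < t.length := by simpa using hi
      have hm : m < t.length := by simpa using hj
      obtain ⟨a', b', t', hp, hx⟩ := ih k m hk hm (by omega)
      refine ⟨a', b', a :: t', ?_, by simpa using hx⟩
      exact (List.Perm.cons a hp).trans
        ((List.Perm.swap _ _ _).trans (List.Perm.cons a' (List.Perm.swap _ _ _)))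

theorem two_count_idx (l : List Int) (a : Int) (h : 2 ≤ l.count a) :
    ∃ i j, ∃ (hi : i < l.length) (hj : j < l.length), i ≠ j ∧ l[i] = a ∧ l[j] = a := by
  induction l with
  | nil => simp at h
  | cons c t ih =>
    by_cases hca : c = a
    · subst hca
      have h1 : 1 ≤ t.count c := by
        rw [List.count_cons_self] at h
        omega
      have hmem : c ∈ t := List.count_pos_iff.mp (by omega)
      obtain ⟨k, hk, hka⟩ := List.mem_iff_getElem.mp hmem
      exact ⟨0, k + 1, by simp, by simpa using hk, by omega, by simp, by simpa using hka⟩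
    · have h2 : 2 ≤ t.count a := by
        simpa [List.count_cons, hca] using h
      obtain ⟨i, j, hi, hj, hne, hia, hja⟩ := ih h2
      exact ⟨i + 1, j + 1, by simpa using hi, by simpa using hj, by omega,
        by simpa using hia, by simpa using hja⟩

theorem pair_to_idx (l : List Int) (x : Int) (h : IsPair l x) :
    ∃ i j, ∃ (hi : i < l.length) (hj : j < l.length), i ≠ j ∧ x = l[i] * l[j] := by
  obtain ⟨a, b, t, hp, hx⟩ := h
  by_cases hab : a = b
  · subst hab
    have hc : 2 ≤ l.count a := by
      rw [hp.count_eq, List.count_cons_self, List.count_cons_self]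
      omega
    obtain ⟨i, j, hi, hj, hne, hia, hja⟩ := two_count_idx l a hc
    exact ⟨i, j, hi, hj, hne, by rw [hia, hja, hx]⟩
  · have ha : a ∈ l := hp.mem_iff.mpr (by simp)
    have hb : b ∈ l := hp.mem_iff.mpr (by simp)
    obtain ⟨i, hi, hia⟩ := List.mem_iff_getElem.mp ha
    obtain ⟨j, hj, hjb⟩ := List.mem_iff_getElem.mp hb
    refine ⟨i, j, hi, hj, ?_, by rw [hia, hjb, hx]⟩
    intro hij
    subst hij
    exact hab (hia.symm.trans hjb)

-- A's inner loop, when length ≠ 2, appends exactly the products with j ≠ i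
theorem solAInner_eq (numbers : List Int) (i : Int) (js answer : List Int)
    (h : numbers.length ≠ 2) :
    solAInner numbers i js answer =
      .ok (answer ++ js.flatMap (fun j => if i ≠ j then
        [PySem.List.pyGetD numbers i 0 * PySem.List.pyGetD numbers j 0] else [])) := by
  induction js generalizing answer with
  | nil => simp [solAInner]
  | cons j rest ih =>
    by_cases hij : i ≠ j <;> simp [solAInner, h, hij, ih]

theorem solAOuter_eq (numbers : List Int) (is answer : List Int)
    (h : numbers.length ≠ 2) :
    solAOuter numbers is answer =
      .ok (answer ++ is.flatMap (fun i =>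
        (PySem.List.pyRange 0 numbers.length 1).flatMap (fun j => if i ≠ j then
          [PySem.List.pyGetD numbers i 0 * PySem.List.pyGetD numbers j 0] else []))) := by
  induction is generalizing answer with
  | nil => simp [solAOuter]
  | cons i rest ih =>
    simp [solAOuter, solAInner_eq numbers i _ _ h, ih]

theorem sorted_mono {s : List Int} (hs : s.Pairwise (· ≤ ·)) {i j : Nat}
    (hij : i ≤ j) (hj : j < s.length) : s[i]'(lt_of_le_of_lt hij hj) ≤ s[j] := by
  rcases Nat.lt_or_eq_of_le hij with h | h
  · exact List.pairwise_iff_getElem.mp hs i j _ hj h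
  · subst h; exact le_refl _

theorem sorted_pair_bound {s : List Int} (hs : s.Pairwise (· ≤ ·)) (h2 : 2 ≤ s.length)
    {i j : Nat} (hi : i < s.length) (hj : j < s.length) (hij : i < j) :
    s[i] * s[j] ≤ max (s[0]'(by omega) * s[1]'(by omega))
      (s[s.length - 2]'(by omega) * s[s.length - 1]'(by omega)) := by
  have h0i : s[0]'(by omega) ≤ s[i] := sorted_mono hs (by omega) hi
  have h1j : s[1]'(by omega) ≤ s[j] := sorted_mono hs (by omega) hj
  have hij' : s[i] ≤ s[j] := sorted_mono hs (by omega) hj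
  have hin2 : s[i] ≤ s[s.length - 2]'(by omega) := sorted_mono hs (by omega) (by omega)
  have hjn1 : s[j] ≤ s[s.length - 1]'(by omega) := sorted_mono hs (by omega) (by omega)
  have hn21 : s[s.length - 2]'(by omega) ≤ s[s.length - 1]'(by omega) :=
    sorted_mono hs (by omega) (by omega)
  rcases le_or_gt 0 (s[i]) with hsi | hsi
  · refine le_trans ?_ (le_max_right _ _)
    calc s[i] * s[j] ≤ s[i] * (s[s.length - 1]'(by omega)) :=
          mul_le_mul_of_nonneg_left hjn1 hsi
      _ ≤ s[s.length - 2]'(by omega) * s[s.length - 1]'(by omega) :=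
          mul_le_mul_of_nonneg_right hin2 (le_trans hsi (le_trans hij' hjn1))
  · rcases le_or_gt (s[j]) 0 with hsj | hsj
    · refine le_trans ?_ (le_max_left _ _)
      calc s[i] * s[j] ≤ s[0]'(by omega) * s[j] :=
            mul_le_mul_of_nonpos_right h0i hsj
        _ ≤ s[0]'(by omega) * s[1]'(by omega) :=
            mul_le_mul_of_nonpos_left h1j (le_trans h0i (le_of_lt hsi))
    · refine le_trans ?_ (le_max_right _ _)
      rcases le_or_gt 0 (s[s.length - 2]'(by omega)) with hn2 | hn2
      · exact le_trans (le_of_lt (mul_neg_of_neg_of_pos hsi hsj))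
          (mul_nonneg hn2 (le_trans hn2 hn21))
      · have hjeq : j = s.length - 1 := by
          by_contra hne
          have hj2 : j ≤ s.length - 2 := by omega
          have : s[j] ≤ s[s.length - 2]'(by omega) := sorted_mono hs hj2 (by omega)
          omega
        subst hjeq
        exact mul_le_mul_of_nonneg_right hin2 (le_of_lt (by omega : (0:Int) < _))

theorem sorted_pair_bound' {s : List Int} (hs : s.Pairwise (· ≤ ·)) (h2 : 2 ≤ s.length)
    {i j : Nat} (hi : i < s.length) (hj : j < s.length) (hne : i ≠ j) :
    s[i] * s[j] ≤ max (s[0]'(by omega) * s[1]'(by omega))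
      (s[s.length - 2]'(by omega) * s[s.length - 1]'(by omega)) := by
  rcases Nat.lt_or_gt_of_ne hne with h | h
  · exact sorted_pair_bound hs h2 hi hj h
  · rw [mul_comm]
    exact sorted_pair_bound hs h2 hj hi h

theorem solution_eq_alt (numbers : List Int) (hpre : 2 ≤ numbers.length) :
    solution numbers = solution_alt numbers := by
  set s := PySem.List.sorted numbers (fun x => x) false with hs_def
  have hslen : s.length = numbers.length := PySem.List.length_sorted numbers (fun x => x) false
  have hperm : s.Perm numbers := PySem.List.sorted_perm numbers (fun x => x) false
  have hpair : s.Pairwise (· ≤ ·) := by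
    simpa using PySem.List.sorted_pairwise numbers (fun x => x)
  have halt : solution_alt numbers =
      max (s[0]'(by omega) * s[1]'(by omega))
          (s[s.length - 2]'(by omega) * s[s.length - 1]'(by omega)) := by
    unfold solution_alt
    dsimp only [← hs_def]
    rw [PySem.List.pyGetD_neg_ofNat s 2 0 (by omega) (by omega),
        PySem.List.pyGetD_neg_ofNat s 1 0 (by omega) (by omega),
        PySem.List.pyGetD_ofNat' s 0 0, PySem.List.pyGetD_ofNat' s 1 0,
        List.getD_eq_getElem s 0 (by omega), List.getD_eq_getElem s 0 (by omega)]
  -- any distinct-index product of numbers is bounded by B's two candidate products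
  have hbound : ∀ (i j : Nat) (hi : i < numbers.length) (hj : j < numbers.length), i ≠ j →
      numbers[i] * numbers[j] ≤ solution_alt numbers := by
    intro i j hi hj hne
    rw [halt]
    have hp : IsPair s (numbers[i] * numbers[j]) :=
      isPair_of_perm hperm (idx_to_pair numbers i j hi hj hne)
    obtain ⟨i', j', hi', hj', hne', heq⟩ := pair_to_idx s _ hp
    rw [heq]
    exact sorted_pair_bound' hpair (by omega) hi' hj' hne'
  -- B's result is itself a distinct-index product of numbers
  have hattain : ∃ (i j : Nat), ∃ (hi : i < numbers.length) (hj : j < numbers.length),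
      i ≠ j ∧ solution_alt numbers = numbers[i] * numbers[j] := by
    rcases max_cases (s[0]'(by omega) * s[1]'(by omega))
        (s[s.length - 2]'(by omega) * s[s.length - 1]'(by omega)) with ⟨hm, -⟩ | ⟨hm, -⟩
    · have hp : IsPair numbers (solution_alt numbers) := by
        rw [halt, hm]
        exact isPair_of_perm hperm.symm (idx_to_pair s 0 1 (by omega) (by omega) (by omega))
      exact pair_to_idx numbers _ hp
    · have hp : IsPair numbers (solution_alt numbers) := by
        rw [halt, hm]
        exact isPair_of_perm hperm.symm
          (idx_to_pair s (s.length - 2) (s.length - 1) (by omega) (by omega) (by omega))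
      exact pair_to_idx numbers _ hp
  by_cases h2 : numbers.length = 2
  · -- early return: numbers = [a, b], A returns a * b
    obtain ⟨a, b, rfl⟩ := List.length_eq_two.mp h2
    have hA : solution [a, b] = a * b := by
      have hr : PySem.List.pyRange 0 (2 : Int) 1 = [0, 1] := by decide
      simp [solution, solAOuter, solAInner, hr, PySem.List.pyGetD, PySem.List.pyGet?,
        PySem.List.pyIdx?]
    rw [hA]
    obtain ⟨i, j, hi, hj, hne, heq⟩ := hattain
    have hi2 : i < 2 := by simpa using hi
    have hj2 : j < 2 := by simpa using hj
    interval_cases i <;> interval_cases j <;>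
      first
      | exact absurd rfl hne
      | (rw [heq]; simp [mul_comm])
  · -- general case: A collects every distinct-index product and takes its max
    have h3 : 3 ≤ numbers.length := by omega
    have hout := solAOuter_eq numbers (PySem.List.pyRange 0 numbers.length 1) [] h2
    have hmem_iff : ∀ x,
        x ∈ (PySem.List.pyRange 0 numbers.length 1).flatMap (fun i =>
          (PySem.List.pyRange 0 numbers.length 1).flatMap (fun j => if i ≠ j then
            [PySem.List.pyGetD numbers i 0 * PySem.List.pyGetD numbers j 0] else [])) ↔
        ∃ (i j : Nat), ∃ (hi : i < numbers.length) (hj : j < numbers.length),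
          i ≠ j ∧ x = numbers[i] * numbers[j] := by
      intro x
      simp only [List.mem_flatMap, PySem.List.mem_pyRange_one]
      constructor
      · rintro ⟨i, ⟨hi0, hin⟩, j, ⟨hj0, hjn⟩, hx⟩
        by_cases hij : i = j
        · simp [hij] at hx
        · rw [if_pos hij, List.mem_singleton] at hx
          refine ⟨i.toNat, j.toNat, by omega, by omega, by omega, ?_⟩
          rw [hx, PySem.List.pyGetD_eq_getElem numbers 0 hi0 (by omega),
            PySem.List.pyGetD_eq_getElem numbers 0 hj0 (by omega)]
      · rintro ⟨i, j, hi, hj, hne, rfl⟩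
        refine ⟨(i : Int), ⟨by omega, by exact_mod_cast hi⟩,
                (j : Int), ⟨by omega, by exact_mod_cast hj⟩, ?_⟩
        rw [if_pos (by exact_mod_cast hne), List.mem_singleton,
          PySem.List.pyGetD_natCast, PySem.List.pyGetD_natCast,
          List.getD_eq_getElem numbers 0 hi, List.getD_eq_getElem numbers 0 hj]
    have hne_nil : (PySem.List.pyRange 0 numbers.length 1).flatMap (fun i =>
          (PySem.List.pyRange 0 numbers.length 1).flatMap (fun j => if i ≠ j then
            [PySem.List.pyGetD numbers i 0 * PySem.List.pyGetD numbers j 0] else [])) ≠ [] := by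
      intro hnil
      have := (hmem_iff (numbers[0]'(by omega) * numbers[1]'(by omega))).mpr
        ⟨0, 1, by omega, by omega, by omega, rfl⟩
      rw [hnil] at this
      simp at this
    obtain ⟨m, hm⟩ : ∃ m, PySem.List.max? ((PySem.List.pyRange 0 numbers.length 1).flatMap (fun i =>
          (PySem.List.pyRange 0 numbers.length 1).flatMap (fun j => if i ≠ j then
            [PySem.List.pyGetD numbers i 0 * PySem.List.pyGetD numbers j 0] else [])))
        (fun x => x) = some m := by
      cases hq : PySem.List.max? ((PySem.List.pyRange 0 numbers.length 1).flatMap (fun i =>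
          (PySem.List.pyRange 0 numbers.length 1).flatMap (fun j => if i ≠ j then
            [PySem.List.pyGetD numbers i 0 * PySem.List.pyGetD numbers j 0] else [])))
          (fun x => x) with
      | none => exact absurd ((PySem.List.max?_eq_none_iff _ _).mp hq) hne_nil
      | some m => exact ⟨m, rfl⟩
    have hAval : solution numbers = m := by
      unfold solution
      rw [hout]
      dsimp only
      simp only [List.nil_append]
      rw [hm]
      rfl
    rw [hAval]
    apply le_antisymm
    · obtain ⟨i, j, hi, hj, hne, heq⟩ := (hmem_iff m).mp (PySem.List.max?_mem hm)
      rw [heq]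
      exact hbound i j hi hj hne
    · obtain ⟨i, j, hi, hj, hne, heq⟩ := hattain
      have hmem : numbers[i] * numbers[j] ∈ (PySem.List.pyRange 0 numbers.length 1).flatMap (fun i =>
          (PySem.List.pyRange 0 numbers.length 1).flatMap (fun j => if i ≠ j then
            [PySem.List.pyGetD numbers i 0 * PySem.List.pyGetD numbers j 0] else [])) :=
        (hmem_iff _).mpr ⟨i, j, hi, hj, hne, rfl⟩
      rw [heq]
      exact PySem.List.max?_isMax hm _ hmem

-- ===== VERDICT (by name: the statement is the Claim_ definition above) =====
theorem solution_spec : Claim_equal_solution := by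
  intro numbers _ hpre
  unfold Spec_solution
  exact solution_eq_alt numbers hpre
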